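-- pv_equiv track=rewrite | github.com/JayBhadiyadra/FitnessBot | app/core_logic.py | filter_foods
-- ===== SOURCE A (Python) =====
-- from typing import Dict, List, Any
--
-- def filter_foods(food_list: List[str], allergies: str, disliked: str) -> List[str]:
--     """Filter out foods based on allergies and dislikes."""
--     filtered = food_list.copy()
--
--     if allergies:
--         allergy_list = [a.strip().lower() for a in allergies.split(',')]
--         filtered = [f for f in filtered if not any(allergy in f.lower() for allergy in allergy_list)]
--
--     if disliked:
--         disliked_list = [d.strip().lower() for d in disliked.split(',')]
--         filtered = [f for f in filtered if not any(dislike in f.lower() for dislike in disliked_list)]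
--
--     return filtered if filtered else food_list  # Return original if all filtered out
-- ===== SOURCE B (Python) =====
-- def filter_foods(food_list, allergies, disliked):
--     """Filter out foods based on allergies and dislikes (single pass over a combined term list)."""
--     terms = []
--     for blob in (allergies, disliked):
--         if blob:
--             terms.extend(t.strip().lower() for t in blob.split(','))
--     filtered = [f for f in food_list if not any(t in f.lower() for t in terms)]
--     return filtered if filtered else food_list
-- ===== Notes on version B (the rewrite author's own statement) =====
-- stated objective: simpler
-- what changed: B builds one combined stripped/lowered term list from both blobs and filters the food list in a single pass, instead of A's two sequential filter passes with separate per-blob term lists.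
import Mathlib
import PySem

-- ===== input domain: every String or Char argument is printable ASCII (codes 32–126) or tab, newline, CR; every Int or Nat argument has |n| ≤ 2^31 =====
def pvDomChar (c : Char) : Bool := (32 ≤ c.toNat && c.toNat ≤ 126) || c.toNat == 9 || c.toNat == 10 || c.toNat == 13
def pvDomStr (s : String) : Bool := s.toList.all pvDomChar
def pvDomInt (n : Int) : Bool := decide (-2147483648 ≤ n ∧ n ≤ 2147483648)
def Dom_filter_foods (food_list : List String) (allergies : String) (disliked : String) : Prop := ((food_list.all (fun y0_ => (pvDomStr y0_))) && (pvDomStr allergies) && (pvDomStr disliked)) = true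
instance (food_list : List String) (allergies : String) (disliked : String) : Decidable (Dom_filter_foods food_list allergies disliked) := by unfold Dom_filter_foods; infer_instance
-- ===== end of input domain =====

-- B collapses A's two sequential filter passes into one pass over a pre-assembled combined term list (objective: simpler; same return value, incl. the fallback to food_list).


-- ===== PORT A =====
def filter_foods (food_list : List String) (allergies : String) (disliked : String) : List String :=
  let filtered := food_list
  let filtered :=
    if allergies ≠ "" then
      let allergy_list := ((PySem.Str.split? allergies ",").getD []).map (fun a => PySem.Str.lower (PySem.Str.strip a))
      filtered.filter (fun f => !(allergy_list.any (fun allergy => PySem.Str.isIn allergy (PySem.Str.lower f))))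
    else filtered
  let filtered :=
    if disliked ≠ "" then
      let disliked_list := ((PySem.Str.split? disliked ",").getD []).map (fun d => PySem.Str.lower (PySem.Str.strip d))
      filtered.filter (fun f => !(disliked_list.any (fun dislike => PySem.Str.isIn dislike (PySem.Str.lower f))))
    else filtered
  if filtered.isEmpty then food_list else filtered

-- ===== PORT B =====
-- terms contributed by one comma-separated blob (empty blob contributes nothing)
def pvTerms (blob : String) : List String :=
  if blob ≠ "" then ((PySem.Str.split? blob ",").getD []).map (fun t => PySem.Str.lower (PySem.Str.strip t)) else []

def filter_foods_alt (food_list : List String) (allergies : String) (disliked : String) : List String :=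
  let terms := pvTerms allergies ++ pvTerms disliked
  let filtered := food_list.filter (fun f => !(terms.any (fun t => PySem.Str.isIn t (PySem.Str.lower f))))
  if filtered.isEmpty then food_list else filtered

-- ===== PRECONDITION & SPEC =====
def Spec_filter_foods (food_list : List String) (allergies : String) (disliked : String) (out : List String) : Prop := out = filter_foods_alt food_list allergies disliked
instance (food_list : List String) (allergies : String) (disliked : String) (out : List String) : Decidable (Spec_filter_foods food_list allergies disliked out) := by unfold Spec_filter_foods; infer_instance

-- ===== CLAIM (what is proved, stated in full; the proofs are below) =====
def Claim_equal_filter_foods : Prop := ∀ (food_list : List String) (allergies : String) (disliked : String), Dom_filter_foods food_list allergies disliked → Spec_filter_foods food_list allergies disliked (filter_foods food_list allergies disliked)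

-- ===== LEMMAS AND PROOFS =====

-- the two sequential filter passes of A equal B's single pass over the concatenated term list
theorem pv_filter_eq (food_list : List String) (allergies disliked : String) :
    filter_foods food_list allergies disliked = filter_foods_alt food_list allergies disliked := by
  unfold filter_foods filter_foods_alt pvTerms
  by_cases ha : allergies = "" <;> by_cases hd : disliked = "" <;>
    simp [ha, hd, List.filter_filter, List.any_append, Bool.and_comm]

-- ===== VERDICT (by name: the statement is the Claim_ definition above) =====
theorem filter_foods_spec : Claim_equal_filter_foods := by
  intro fl a d _
  exact pv_filter_eq fl a d
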